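-- pv_equiv track=rewrite | github.com/SXV357/Complete-Python-Developer-in-2022-ZTM | Problems/BPA_Regionals_Practice/BPA_Regionals_Practice-5.py | product_primes
-- ===== SOURCE A (Python) =====
-- def product_primes(n):
--     res = []
--     values = list(range(n))
--     primes = [i for i in range(2, n) if all(i % j != 0 for j in range(2, i))]
--     for value in values:
--         for i in primes:
--             for j in primes:
--                 for k in primes:
--                     if i * j * k == value:
--                         res.append([i, j, k])
--     return res
-- ===== SOURCE B (Python) =====
-- def product_primes(n):
--     primes = [i for i in range(2, n) if all(i % j != 0 for j in range(2, i))]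
--     pairs = [(i * j * k, [i, j, k])
--              for i in primes for j in primes for k in primes
--              if i * j * k < n]
--     pairs.sort(key=lambda t: t[0])
--     return [t for _, t in pairs]
-- ===== Notes on version B (the rewrite author's own statement) =====
-- stated objective: faster
-- what changed: B drops A's outer loop over every value below n: it enumerates the prime triples once as (product, triple) pairs kept only when the product is below n, stable-sorts the pairs by product, and returns the triples in that order.
import Mathlib
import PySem

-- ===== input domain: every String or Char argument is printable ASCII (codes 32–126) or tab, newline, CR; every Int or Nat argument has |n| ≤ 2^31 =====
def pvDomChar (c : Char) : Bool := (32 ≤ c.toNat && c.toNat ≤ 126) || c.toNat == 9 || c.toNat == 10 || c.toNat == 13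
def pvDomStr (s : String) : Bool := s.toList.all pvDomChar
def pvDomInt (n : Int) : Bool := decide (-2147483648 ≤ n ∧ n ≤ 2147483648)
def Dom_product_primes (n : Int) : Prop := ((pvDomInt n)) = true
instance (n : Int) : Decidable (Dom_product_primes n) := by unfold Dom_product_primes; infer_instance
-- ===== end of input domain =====

-- B enumerates the prime triples once as (product, triple) pairs with product < n,
-- stable-sorts them by product and projects the triples, instead of A's rescanning
-- of all prime triples for each value below n (asymptotically faster).

-- ===== PORT A =====
def product_primes (n : Int) : List (List Int) :=
  let values := PySem.List.pyRange 0 n 1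
  let primes := (PySem.List.pyRange 2 n 1).filter
    (fun i => (PySem.List.pyRange 2 i 1).all (fun j => PySem.Int.mod i j != 0))
  values.foldl (fun res value =>
    primes.foldl (fun res i =>
      primes.foldl (fun res j =>
        primes.foldl (fun res k =>
          if i * j * k == value then res ++ [[i, j, k]] else res) res) res) res) []

-- ===== PORT B =====
def product_primes_alt (n : Int) : List (List Int) :=
  let primes := (PySem.List.pyRange 2 n 1).filter
    (fun i => (PySem.List.pyRange 2 i 1).all (fun j => PySem.Int.mod i j != 0))
  let pairs : List (Int × List Int) :=
    primes.flatMap (fun i => primes.flatMap (fun j =>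
      (primes.filter (fun k => i * j * k < n)).map (fun k => (i * j * k, [i, j, k]))))
  (PySem.List.sorted pairs (fun t => t.1) false).map (fun t => t.2)

-- ===== PRECONDITION & SPEC =====
def Spec_product_primes (n : Int) (out : List (List Int)) : Prop := out = product_primes_alt n
instance (n : Int) (out : List (List Int)) : Decidable (Spec_product_primes n out) := by unfold Spec_product_primes; infer_instance

-- ===== CLAIM (what is proved, stated in full; the proofs are below) =====
def Claim_equal_product_primes : Prop := ∀ (n : Int), Dom_product_primes n → Spec_product_primes n (product_primes n)

-- ===== LEMMAS AND PROOFS =====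

-- insertBy places x after every element it is not 'before' and in front of the rest
lemma pvInsertBy_split {α : Type} (before : α → α → Bool) (x : α) (A B : List α)
    (hA : ∀ a ∈ A, before x a = false) (hB : ∀ b ∈ B, before x b = true) :
    PySem.List.insertBy before x (A ++ B) = A ++ x :: B := by
  induction A with
  | nil =>
      cases B with
      | nil => rfl
      | cons b t =>
          simp [PySem.List.insertBy, hB b (List.mem_cons_self ..)]
  | cons a A ih =>
      simp only [List.cons_append, PySem.List.insertBy,
        hA a (List.mem_cons_self ..), Bool.false_eq_true, if_false]
      rw [ih (fun a' ha' => hA a' (List.mem_cons_of_mem _ ha'))]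

-- stable sort by a key with values in [0, N) is the concatenation of the key buckets
lemma pvSorted_buckets (L : List (Int × List Int)) (N : Nat)
    (h : ∀ x ∈ L, 0 ≤ x.1 ∧ x.1 < (N : Int)) :
    PySem.List.sorted L (fun t => t.1) false =
      (List.range N).flatMap (fun v => L.filter (fun t => t.1 == ((v : Nat) : Int))) := by
  induction L using List.reverseRecOn with
  | nil => simp [PySem.List.sorted]
  | append_singleton L x ih =>
      have hx := h x (by simp)
      have hL : ∀ y ∈ L, 0 ≤ y.1 ∧ y.1 < (N : Int) :=
        fun y hy => h y (List.mem_append_left _ hy)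
      rw [PySem.List.sorted_eq_foldl_insertBy, List.foldl_append, List.foldl_cons,
        List.foldl_nil, ← PySem.List.sorted_eq_foldl_insertBy, ih hL]
      set v₀ : Nat := x.1.toNat with hv₀
      have hxv : ((v₀ : Nat) : Int) = x.1 := by omega
      have hsplit : N = (v₀ + 1) + (N - (v₀ + 1)) := by omega
      rw [hsplit, List.range_add, List.flatMap_append, List.flatMap_append, List.flatMap_map,
        List.flatMap_map]
      have hB' : (List.range (N - (v₀ + 1))).flatMap
            (fun v => (L ++ [x]).filter (fun t => t.1 == (((v₀ + 1 + v : Nat)) : Int))) =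
          (List.range (N - (v₀ + 1))).flatMap
            (fun v => L.filter (fun t => t.1 == (((v₀ + 1 + v : Nat)) : Int))) := by
        apply List.flatMap_congr
        intro v _
        have hc : (x.1 == (((v₀ + 1 + v : Nat)) : Int)) = false := by
          rw [beq_eq_false_iff_ne]; omega
        have hc2 : (x.1 == ((v₀ : Int) + 1 + (v : Int))) = false := by
          rw [beq_eq_false_iff_ne]; omega
        simp [List.filter_append, hc2]
      have hA' : (List.range (v₀ + 1)).flatMap
            (fun v => (L ++ [x]).filter (fun t => t.1 == ((v : Nat) : Int))) =
          (List.range (v₀ + 1)).flatMap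
            (fun v => L.filter (fun t => t.1 == ((v : Nat) : Int))) ++ [x] := by
        rw [List.range_succ, List.flatMap_append, List.flatMap_append,
          List.flatMap_singleton, List.flatMap_singleton]
        have hrest : (List.range v₀).flatMap
              (fun v => (L ++ [x]).filter (fun t => t.1 == ((v : Nat) : Int))) =
            (List.range v₀).flatMap
              (fun v => L.filter (fun t => t.1 == ((v : Nat) : Int))) := by
          apply List.flatMap_congr
          intro v hv
          have hvlt : v < v₀ := List.mem_range.mp hv
          have hc : (x.1 == ((v : Nat) : Int)) = false := by
            rw [beq_eq_false_iff_ne]; omega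
          simp [List.filter_append, hc]
        have hc : (x.1 == ((v₀ : Nat) : Int)) = true := by simp [hxv]
        rw [hrest]
        simp [List.filter_append, hc, List.append_assoc]
      rw [hA', hB', pvInsertBy_split _ x
        ((List.range (v₀ + 1)).flatMap (fun v => L.filter (fun t => t.1 == ((v : Nat) : Int))))
        ((List.range (N - (v₀ + 1))).flatMap
          (fun v => L.filter (fun t => t.1 == (((v₀ + 1 + v : Nat)) : Int))))]
      · simp
      · intro a ha
        simp only [List.mem_flatMap, List.mem_range, List.mem_filter] at ha
        obtain ⟨v, hv, haL, hak⟩ := ha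
        have : a.1 = ((v : Nat) : Int) := by simpa using hak
        simp only [decide_eq_false_iff_not, not_lt]
        omega
      · intro b hb
        simp only [List.mem_flatMap, List.mem_range, List.mem_filter] at hb
        obtain ⟨v, hv, hbL, hbk⟩ := hb
        have : b.1 = (((v₀ + 1 + v : Nat)) : Int) := by simpa using hbk
        simp only [decide_eq_true_eq]
        omega

lemma pvPrimes_pos (n : Int) :
    ∀ x ∈ (PySem.List.pyRange 2 n 1).filter
      (fun i => (PySem.List.pyRange 2 i 1).all (fun j => PySem.Int.mod i j != 0)), 2 ≤ x ∧ x < n := by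
  intro x hx
  have := List.mem_of_mem_filter hx
  rw [PySem.List.mem_pyRange_one] at this
  omega

-- ===== VERDICT (by name: the statement is the Claim_ definition above) =====
theorem product_primes_spec : Claim_equal_product_primes := by
  intro n _
  unfold Spec_product_primes product_primes product_primes_alt
  dsimp only
  set P := (PySem.List.pyRange 2 n 1).filter
    (fun i => (PySem.List.pyRange 2 i 1).all (fun j => PySem.Int.mod i j != 0)) with hPdef
  have hP : ∀ x ∈ P, 2 ≤ x ∧ x < n := pvPrimes_pos n
  clear_value P
  set pairs : List (Int × List Int) :=
    P.flatMap (fun i => P.flatMap (fun j =>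
      (P.filter (fun k => i * j * k < n)).map (fun k => (i * j * k, [i, j, k])))) with hpairs
  have hkeys : ∀ x ∈ pairs, 0 ≤ x.1 ∧ x.1 < ((n.toNat : Nat) : Int) := by
    intro x hxm
    simp only [hpairs, List.mem_flatMap, List.mem_map, List.mem_filter] at hxm
    obtain ⟨i, hi, j, hj, k, ⟨hk, hkn⟩, rfl⟩ := hxm
    have hi' := hP i hi; have hj' := hP j hj; have hk' := hP k hk
    have h0 : (0 : Int) ≤ i * j * k :=
      mul_nonneg (mul_nonneg (by omega) (by omega)) (by omega)
    have hlt : i * j * k < n := by simpa using hkn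
    exact ⟨h0, by omega⟩
  rw [pvSorted_buckets pairs n.toNat hkeys, List.map_flatMap]
  -- A's side: unfold the four nested appending loops
  simp only [PySem.List.foldl_append_if, PySem.List.foldl_append_eq_flatMap, List.nil_append]
  rw [PySem.List.pyRange_one, List.flatMap_map]
  simp only [sub_zero, zero_add]
  apply List.flatMap_congr
  intro v hv
  have hvn : ((v : Nat) : Int) < n := by
    have := List.mem_range.mp hv; omega
  -- bucket v of the sorted pairs is exactly A's per-value triple scan
  rw [hpairs]
  simp only [List.filter_flatMap, List.map_flatMap]
  apply List.flatMap_congr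
  intro i _
  apply List.flatMap_congr
  intro j _
  rw [List.filter_map, List.filter_filter, List.map_map]
  have hfc : ∀ k ∈ P,
      (((fun t : Int × List Int => t.1 == ((v : Nat) : Int)) ∘ fun k => (i * j * k, [i, j, k])) k
        && decide (i * j * k < n)) = (i * j * k == ((v : Nat) : Int)) := by
    intro k _
    by_cases he : i * j * k = ((v : Nat) : Int)
    · simp [Function.comp, he, hvn]
    · simp [Function.comp, he]
  rw [List.filter_congr hfc]
  simp [Function.comp_def]
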